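-- pv_equiv track=rewrite | github.com/MorSalo/PyAss | ass4/allSums.py | MyAllSumsDP
-- ===== SOURCE A (Python) =====
-- from collections import deque
--
-- def MyAllSumsDP(arr):
--     helper = set()
--     stack = deque()
--     stack2 = deque()
--     for i in range(len(arr) - 1, -1, -1):
--         if i == len(arr) - 1:
--             helper.add(arr[i])
--             stack.append(arr[i])
--         else:
--             while len(stack) != 0:
--                 x = stack.pop()
--                 helper.add(arr[i] + x)
--                 stack2.append(arr[i] + x)
--             helper.add(arr[i])
--             stack2.append(arr[i])
--             stack.clear()
--             stack = deque(stack2)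
--             stack2.clear()
--     return sorted(helper)
-- ===== SOURCE B (Python) =====
-- def MyAllSumsDP(arr):
--     sums = set()
--     for i in range(len(arr)):
--         s = 0
--         for j in range(i, len(arr)):
--             s += arr[j]
--             sums.add(s)
--     return sorted(sums)
-- ===== Notes on version B (the rewrite author's own statement) =====
-- stated objective: simpler
-- what changed: Replaced the two-deque suffix DP (popping and rebuilding a deque of suffix-extension sums for each index) with a plain nested loop that keeps a running sum arr[i..j] per start index and adds it to a set; same sorted distinct-sum result.
import Mathlib
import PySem

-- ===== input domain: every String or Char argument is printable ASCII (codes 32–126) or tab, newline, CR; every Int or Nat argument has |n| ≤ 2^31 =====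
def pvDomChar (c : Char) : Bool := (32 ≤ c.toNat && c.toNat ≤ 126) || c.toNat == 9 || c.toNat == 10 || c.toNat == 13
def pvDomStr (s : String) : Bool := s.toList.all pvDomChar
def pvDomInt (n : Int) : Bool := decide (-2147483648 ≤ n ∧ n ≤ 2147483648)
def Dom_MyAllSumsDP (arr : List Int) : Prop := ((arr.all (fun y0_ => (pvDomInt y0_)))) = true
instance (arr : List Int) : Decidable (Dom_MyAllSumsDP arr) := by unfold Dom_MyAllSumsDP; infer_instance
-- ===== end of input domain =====

-- B replaces A's two-deque suffix DP with a plain nested loop keeping a running subarray sum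
-- per start index; same distinct contiguous-subarray sums, sorted (objective: simpler).

-- ===== PORT A =====
-- the inner 'while len(stack) != 0: x = stack.pop(); helper.add(arr[i]+x); stack2.append(arr[i]+x)'
-- (deque.pop takes the RIGHT end, hence getLast/dropLast)
def pvDrainA (ai : Int) : List Int → List Int → PySem.Set Int → List Int × PySem.Set Int
  | [], stack2, helper => (stack2, helper)
  | x :: rest, stack2, helper =>
      let y := (x :: rest).getLast (by simp)
      pvDrainA ai (x :: rest).dropLast (stack2 ++ [ai + y]) (PySem.Set.add helper (ai + y))
termination_by stack => stack.length
decreasing_by simp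

def MyAllSumsDP (arr : List Int) : List Int :=
  let n : Int := arr.length
  let fin := (PySem.List.pyRange (n - 1) (-1) (-1)).foldl
    (fun (st : PySem.Set Int × List Int) i =>
      let helper := st.1
      let stack := st.2
      if i = n - 1 then
        (PySem.Set.add helper (PySem.List.pyGetD arr i 0), stack ++ [PySem.List.pyGetD arr i 0])
      else
        let r := pvDrainA (PySem.List.pyGetD arr i 0) stack [] helper
        (PySem.Set.add r.2 (PySem.List.pyGetD arr i 0), r.1 ++ [PySem.List.pyGetD arr i 0]))
    ([], [])
  PySem.List.sorted fin.1 (fun x => x) false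

-- ===== PORT B =====
def MyAllSumsDP_alt (arr : List Int) : List Int :=
  let sums := (PySem.List.pyRange 0 (arr.length : Int) 1).foldl
    (fun (sums : PySem.Set Int) i =>
      ((PySem.List.pyRange i (arr.length : Int) 1).foldl
        (fun (p : Int × PySem.Set Int) j =>
          (p.1 + PySem.List.pyGetD arr j 0, PySem.Set.add p.2 (p.1 + PySem.List.pyGetD arr j 0)))
        (0, sums)).2)
    []
  PySem.List.sorted sums (fun x => x) false

-- ===== PRECONDITION & SPEC =====
def Spec_MyAllSumsDP (arr : List Int) (out : List Int) : Prop := out = MyAllSumsDP_alt arr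
instance (arr : List Int) (out : List Int) : Decidable (Spec_MyAllSumsDP arr out) := by unfold Spec_MyAllSumsDP; infer_instance

-- ===== CLAIM (what is proved, stated in full; the proofs are below) =====
def Claim_equal_MyAllSumsDP : Prop := ∀ (arr : List Int), Dom_MyAllSumsDP arr → Spec_MyAllSumsDP arr (MyAllSumsDP arr)

-- ===== LEMMAS AND PROOFS =====

-- abstract one step of A's outer loop (prepending element a)
def pvStepA (a : Int) (st : PySem.Set Int × List Int) : PySem.Set Int × List Int :=
  (PySem.Set.add (PySem.Set.update st.1 (st.2.reverse.map (fun x => a + x))) a,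
   st.2.reverse.map (fun x => a + x) ++ [a])

theorem pvDrainA_concat (ai y : Int) (ys stack2 : List Int) (helper : PySem.Set Int) :
    pvDrainA ai (ys ++ [y]) stack2 helper
      = pvDrainA ai ys (stack2 ++ [ai + y]) (PySem.Set.add helper (ai + y)) := by
  cases ys with
  | nil => simp [pvDrainA]
  | cons z zs =>
      have hd : (z :: (zs ++ [y])).dropLast = z :: zs := List.dropLast_concat (l₁ := z :: zs) (b := y)
      have hg : (z :: (zs ++ [y])).getLast (by simp) = y := List.getLast_concat (l := z :: zs) (a := y)
      simp [pvDrainA, hd, hg]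

theorem pvDrainA_eq (ai : Int) (stack stack2 : List Int) (helper : PySem.Set Int) :
    pvDrainA ai stack stack2 helper
      = (stack2 ++ stack.reverse.map (fun x => ai + x),
         PySem.Set.update helper (stack.reverse.map (fun x => ai + x))) := by
  induction stack using List.reverseRecOn generalizing stack2 helper with
  | nil => simp [pvDrainA, PySem.Set.update]
  | append_singleton ys y ih =>
      rw [pvDrainA_concat, ih]
      simp [PySem.Set.update]

-- A's countdown fold is a foldr of pvStepA over the list
theorem pv_fold_countdown {σ : Type} (arr : List Int) (F : Int → σ → σ) :
    ∀ (m : Nat) (s : σ), m ≤ arr.length →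
      (PySem.List.pyRange ((m : Int) - 1) (-1) (-1)).foldl
        (fun st i => F (PySem.List.pyGetD arr i 0) st) s
        = (arr.take m).foldr F s := by
  intro m
  induction m with
  | zero => intro s _; simp [PySem.List.pyRange_neg_one_eq_nil]
  | succ k ih =>
      intro s hm
      have h1 : ((k : Int) + 1 - 1) = (k : Int) := by ring
      rw [show (((k + 1 : Nat) : Int) - 1) = (k : Int) by push_cast; ring]
      rw [PySem.List.pyRange_neg_one_cons (by omega)]
      simp only [List.foldl_cons]
      rw [ih _ (by omega)]
      have hk : k < arr.length := by omega
      have hget : PySem.List.pyGetD arr (k : Int) 0 = arr[k] := by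
        simp [PySem.List.pyGetD_natCast, List.getD_eq_getElem?_getD, List.getElem?_eq_getElem hk]
      rw [hget, List.take_add_one, List.foldr_append]
      simp [List.getElem?_eq_getElem hk]

-- A's loop body, named (definitionally equal to the lambda in the port)
def pvFA (arr : List Int) (n : Int) : (PySem.Set Int × List Int) → Int → PySem.Set Int × List Int :=
  fun st i =>
    if i = n - 1 then
      (PySem.Set.add st.1 (PySem.List.pyGetD arr i 0), st.2 ++ [PySem.List.pyGetD arr i 0])
    else
      ((pvDrainA (PySem.List.pyGetD arr i 0) st.2 [] st.1).2.add (PySem.List.pyGetD arr i 0),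
       (pvDrainA (PySem.List.pyGetD arr i 0) st.2 [] st.1).1 ++ [PySem.List.pyGetD arr i 0])

theorem pvFA_ne (arr : List Int) (n : Int) (st : PySem.Set Int × List Int) (i : Int)
    (h : i ≠ n - 1) : pvFA arr n st i = pvStepA (PySem.List.pyGetD arr i 0) st := by
  unfold pvFA
  rw [if_neg h, pvDrainA_eq]
  simp [pvStepA]

theorem pvA_eq_foldr (arr : List Int) :
    MyAllSumsDP arr
      = PySem.List.sorted (arr.foldr pvStepA ([], [])).1 (fun x => x) false := by
  unfold MyAllSumsDP
  cases h : arr.length with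
  | zero =>
      have h0 : arr = [] := List.length_eq_zero_iff.mp h
      subst h0
      simp [PySem.List.pyRange_neg_one_eq_nil]
  | succ m =>
      show PySem.List.sorted
          (List.foldl (pvFA arr ((m+1 : Nat) : Int)) ([], [])
            (PySem.List.pyRange (((m+1 : Nat) : Int) - 1) (-1) (-1))).1 (fun x => x) false = _
      have hm : m < arr.length := by omega
      have hget : PySem.List.pyGetD arr (m : Int) 0 = arr[m] := by
        simp [PySem.List.pyGetD_natCast, List.getD_eq_getElem?_getD, List.getElem?_eq_getElem hm]
      have hm1 : ((m+1 : Nat) : Int) - 1 = (m : Int) := by push_cast; ring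
      rw [hm1, PySem.List.pyRange_neg_one_cons (by omega), List.foldl_cons]
      have e1 : pvFA arr ((m+1 : Nat) : Int) ([], []) (m : Int) = pvStepA arr[m] ([], []) := by
        unfold pvFA
        rw [if_pos (by omega), hget]
        simp [pvStepA, PySem.Set.update]
      rw [e1]
      have e2 : List.foldl (pvFA arr ((m+1 : Nat) : Int)) (pvStepA arr[m] ([], []))
            (PySem.List.pyRange ((m : Int) - 1) (-1) (-1))
          = List.foldl (fun st i => pvStepA (PySem.List.pyGetD arr i 0) st)
            (pvStepA arr[m] ([], [])) (PySem.List.pyRange ((m : Int) - 1) (-1) (-1)) := by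
        apply PySem.List.foldl_congr_mem
        intro st i hi
        rw [PySem.List.mem_pyRange_neg_one] at hi
        exact pvFA_ne arr _ st i (by omega)
      rw [e2, pv_fold_countdown arr pvStepA m _ (by omega)]
      have hdrop : arr.drop m = [arr[m]] := by
        rw [List.drop_eq_getElem_cons hm]
        have : arr.drop (m+1) = [] := List.drop_eq_nil_of_le (by omega)
        rw [this]
      conv_rhs => rw [← List.take_append_drop m arr, hdrop, List.foldr_append]
      simp

-- membership of A's stack: the nonempty prefix sums
theorem pv_stack_mem (l : List Int) : ∀ x : Int,
    x ∈ (l.foldr pvStepA ([], [])).2 ↔ ∃ k < l.length, x = (l.take (k+1)).sum := by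
  induction l with
  | nil => intro x; simp
  | cons a rest ih =>
      intro x
      simp only [List.foldr_cons, pvStepA, List.mem_append, List.mem_map, List.mem_reverse,
        List.mem_singleton]
      constructor
      · rintro (⟨y, hy, rfl⟩ | rfl)
        · obtain ⟨k, hk, rfl⟩ := (ih y).mp hy
          exact ⟨k+1, by simp; omega, by simp⟩
        · exact ⟨0, by simp, by simp⟩
      · rintro ⟨k, hk, rfl⟩
        cases k with
        | zero => right; simp
        | succ k' =>
            left
            refine ⟨(rest.take (k'+1)).sum, (ih _).mpr ⟨k', by simp at hk; omega, rfl⟩, by simp⟩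

theorem pv_helper_nodup (l : List Int) : (l.foldr pvStepA ([], [])).1.Nodup := by
  induction l with
  | nil => simp
  | cons a rest ih =>
      simp only [List.foldr_cons, pvStepA]
      apply PySem.Set.nodup_add
      apply PySem.Set.nodup_update
      exact ih

theorem pv_helper_mem (l : List Int) : ∀ x : Int,
    x ∈ (l.foldr pvStepA ([], [])).1
      ↔ ∃ i k, i + k < l.length ∧ x = ((l.drop i).take (k+1)).sum := by
  induction l with
  | nil => intro x; simp
  | cons a rest ih =>
      intro x
      simp only [List.foldr_cons, pvStepA]
      rw [PySem.Set.mem_add, PySem.Set.mem_update]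
      simp only [List.mem_map, List.mem_reverse, ih x]
      constructor
      · rintro ((⟨i, k, hik, rfl⟩ | ⟨y, hy, rfl⟩) | rfl)
        · exact ⟨i+1, k, by simp; omega, by simp⟩
        · obtain ⟨k, hk, rfl⟩ := (pv_stack_mem rest y).mp hy
          exact ⟨0, k+1, by simp; omega, by simp⟩
        · exact ⟨0, 0, by simp, by simp⟩
      · rintro ⟨i, k, hik, rfl⟩
        cases i with
        | zero =>
            cases k with
            | zero => right; simp
            | succ k' =>
                left; right
                refine ⟨(rest.take (k'+1)).sum,
                  (pv_stack_mem rest _).mpr ⟨k', by simp at hik; omega, rfl⟩, by simp⟩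
        | succ i' =>
            left; left
            exact ⟨i', k, by simp at hik; omega, by simp⟩

-- B's inner loop
def pvInner (l : List Int) (s0 : Int) (S : PySem.Set Int) : Int × PySem.Set Int :=
  l.foldl (fun p a => (p.1 + a, PySem.Set.add p.2 (p.1 + a))) (s0, S)

theorem pvInner_mem (l : List Int) : ∀ (s0 : Int) (S : PySem.Set Int) (x : Int),
    x ∈ (pvInner l s0 S).2 ↔ x ∈ S ∨ ∃ k < l.length, x = s0 + (l.take (k+1)).sum := by
  induction l with
  | nil => intro s0 S x; simp [pvInner]
  | cons a t ih =>
      intro s0 S x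
      show x ∈ (pvInner t (s0+a) (PySem.Set.add S (s0+a))).2 ↔ _
      rw [ih, PySem.Set.mem_add]
      constructor
      · rintro ((h | rfl) | ⟨k, hk, rfl⟩)
        · exact Or.inl h
        · exact Or.inr ⟨0, by simp, by simp⟩
        · exact Or.inr ⟨k+1, by simp; omega, by simp; ring⟩
      · rintro (h | ⟨k, hk, rfl⟩)
        · exact Or.inl (Or.inl h)
        · cases k with
          | zero => left; right; simp
          | succ k' =>
              right
              exact ⟨k', by simp at hk; omega, by simp; ring⟩

theorem pvInner_nodup (l : List Int) : ∀ (s0 : Int) (S : PySem.Set Int), S.Nodup →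
    (pvInner l s0 S).2.Nodup := by
  induction l with
  | nil => intro s0 S h; exact h
  | cons a t ih =>
      intro s0 S h
      show ((pvInner t (s0+a) (PySem.Set.add S (s0+a))).2).Nodup
      apply ih
      apply PySem.Set.nodup_add
      exact h

def pvOuter (arr : List Int) (n : Nat) : PySem.Set Int :=
  (List.range n).foldl (fun S k => (pvInner (arr.drop k) 0 S).2) []

theorem pvOuter_mem (arr : List Int) (n : Nat) (x : Int) :
    x ∈ pvOuter arr n ↔ ∃ i < n, ∃ k < (arr.drop i).length, x = ((arr.drop i).take (k+1)).sum := by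
  induction n with
  | zero => simp [pvOuter]
  | succ n ih =>
      unfold pvOuter
      rw [List.range_succ, List.foldl_append]
      show x ∈ (pvInner (arr.drop n) 0 (pvOuter arr n)).2 ↔ _
      rw [pvInner_mem, ih]
      constructor
      · rintro (⟨i, hi, k, hk, rfl⟩ | ⟨k, hk, rfl⟩)
        · exact ⟨i, by omega, k, hk, rfl⟩
        · exact ⟨n, by omega, k, hk, by simp⟩
      · rintro ⟨i, hi, k, hk, rfl⟩
        by_cases h : i < n
        · exact Or.inl ⟨i, h, k, hk, rfl⟩
        · have he : i = n := by omega
          subst he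
          exact Or.inr ⟨k, hk, by simp⟩

theorem pvOuter_nodup (arr : List Int) (n : Nat) : (pvOuter arr n).Nodup := by
  induction n with
  | zero => simp [pvOuter]
  | succ n ih =>
      unfold pvOuter
      rw [List.range_succ, List.foldl_append]
      show ((pvInner (arr.drop n) 0 (pvOuter arr n)).2).Nodup
      exact pvInner_nodup _ _ _ ih

theorem pvB_eq_outer (arr : List Int) :
    MyAllSumsDP_alt arr
      = PySem.List.sorted (pvOuter arr arr.length) (fun x => x) false := by
  unfold MyAllSumsDP_alt pvOuter
  rw [PySem.List.pyRange_one]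
  rw [show ((arr.length : Int) - 0).toNat = arr.length by omega]
  rw [List.foldl_map]
  refine congrArg (fun s => PySem.List.sorted s (fun x => x) false) ?_
  apply PySem.List.foldl_congr_mem
  intro S k hk
  rw [show (0 : Int) + (k : Int) = (k : Int) by ring]
  have hfold := PySem.List.foldl_pyRange_pyGetD' arr 0
      (fun (p : Int × PySem.Set Int) a => (p.1 + a, PySem.Set.add p.2 (p.1 + a)))
      ((0 : Int), S) (a := (k : Int)) (by omega)
  exact congrArg Prod.snd hfold

-- ===== VERDICT (by name: the statement is the Claim_ definition above) =====
theorem MyAllSumsDP_spec : Claim_equal_MyAllSumsDP := by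
  intro arr _
  unfold Spec_MyAllSumsDP
  rw [pvA_eq_foldr, pvB_eq_outer]
  rw [PySem.List.sorted_id_eq_sorted_id_iff_perm]
  rw [List.perm_ext_iff_of_nodup (pv_helper_nodup arr) (pvOuter_nodup arr arr.length)]
  intro x
  rw [pv_helper_mem, pvOuter_mem]
  constructor
  · rintro ⟨i, k, h, rfl⟩
    exact ⟨i, by omega, k, by simp; omega, rfl⟩
  · rintro ⟨i, hi, k, hk, rfl⟩
    exact ⟨i, k, by simp at hk; omega, rfl⟩
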